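-- pv_equiv track=rewrite | github.com/CTURF/kex | costs.py | dac_search
-- ===== SOURCE A (Python) =====
-- def dac_search(target,r0,r1,r2,chain,chainlen,best,bestlen):
--   if chainlen >= bestlen: return best,bestlen
--   if r2 > target: return best,bestlen
--   if r2<<(bestlen-1-chainlen) < target: return best,bestlen
--   if r2 == target: return chain,chainlen
--   chain *= 2
--   chainlen += 1
--   best,bestlen = dac_search(target,r0,r2,r0+r2,chain+1,chainlen,best,bestlen)
--   best,bestlen = dac_search(target,r1,r2,r1+r2,chain,chainlen,best,bestlen)
--   return best,bestlen
-- ===== SOURCE B (Python) =====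
-- def dac_search(target, r0, r1, r2, chain, chainlen, best, bestlen):
--     stack = [(r0, r1, r2, chain, chainlen)]
--     while stack:
--         s0, s1, s2, c, cl = stack.pop()
--         if cl >= bestlen or s2 > target or s2 << (bestlen - 1 - cl) < target:
--             continue
--         if s2 == target:
--             best, bestlen = c, cl
--             continue
--         stack.append((s1, s2, s1 + s2, c * 2, cl + 1))
--         stack.append((s0, s2, s0 + s2, c * 2 + 1, cl + 1))
--     return best, bestlen
-- ===== Notes on version B (the rewrite author's own statement) =====
-- stated objective: alternative
-- what changed: The branch-and-bound recursion is replaced by an iterative depth-first search over an explicit stack of frames, with pruning/acceptance checked against the live best/bestlen at pop time so it threads bestlen exactly as the recursion does.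
import Mathlib
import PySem

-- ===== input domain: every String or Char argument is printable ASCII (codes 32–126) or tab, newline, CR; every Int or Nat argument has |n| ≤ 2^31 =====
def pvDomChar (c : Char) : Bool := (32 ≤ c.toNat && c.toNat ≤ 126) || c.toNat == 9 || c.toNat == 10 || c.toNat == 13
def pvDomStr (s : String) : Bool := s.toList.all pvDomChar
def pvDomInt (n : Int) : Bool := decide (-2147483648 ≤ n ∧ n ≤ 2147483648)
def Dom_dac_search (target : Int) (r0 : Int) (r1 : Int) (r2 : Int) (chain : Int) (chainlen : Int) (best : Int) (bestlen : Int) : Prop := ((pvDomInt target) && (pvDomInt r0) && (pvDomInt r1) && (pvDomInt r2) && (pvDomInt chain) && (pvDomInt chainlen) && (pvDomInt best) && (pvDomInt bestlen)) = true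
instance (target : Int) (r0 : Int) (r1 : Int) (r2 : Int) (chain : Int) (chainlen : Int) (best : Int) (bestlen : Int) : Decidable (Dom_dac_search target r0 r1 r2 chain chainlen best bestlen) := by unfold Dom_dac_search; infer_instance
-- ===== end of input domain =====

-- B replaces A's binary recursion by an iterative DFS over an explicit stack of frames with a
-- live best/bestlen (objective: alternative decomposition, same pruning and same result).
-- ===== PORT A =====
-- A's recursion is given fuel (bestlen - chainlen).toNat, which bounds the recursion depth
-- (each call increments chainlen, and chainlen >= bestlen returns immediately); the fuel is
-- only a totality device, fuel 0 coincides with the chainlen >= bestlen early return.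
def dacA (fuel : Nat) (target : Int) (r0 : Int) (r1 : Int) (r2 : Int) (chain : Int) (chainlen : Int) (best : Int) (bestlen : Int) : Int × Int :=
  match fuel with
  | 0 => (best, bestlen)
  | f + 1 =>
    if bestlen ≤ chainlen then (best, bestlen)
    else if target < r2 then (best, bestlen)
    else if r2 <<< (bestlen - 1 - chainlen).toNat < target then (best, bestlen)
    else if r2 = target then (chain, chainlen)
    else
      let p := dacA f target r0 r2 (r0 + r2) (chain * 2 + 1) (chainlen + 1) best bestlen
      dacA f target r1 r2 (r1 + r2) (chain * 2) (chainlen + 1) p.1 p.2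

def dac_search (target : Int) (r0 : Int) (r1 : Int) (r2 : Int) (chain : Int) (chainlen : Int) (best : Int) (bestlen : Int) : Int × Int :=
  dacA (bestlen - chainlen).toNat target r0 r1 r2 chain chainlen best bestlen

-- ===== PORT B =====
-- B's while-loop over the explicit stack, given fuel 3^(bestlen - chainlen).toNat which bounds
-- the number of loop iterations; again only a totality device (fuel 0 is unreachable before
-- the stack empties, proved below).
def dacB (fuel : Nat) (target : Int) (stack : List (Int × Int × Int × Int × Int)) (best : Int) (bestlen : Int) : Int × Int :=
  match fuel with
  | 0 => (best, bestlen)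
  | f + 1 =>
    match stack with
    | [] => (best, bestlen)
    | (s0, s1, s2, c, cl) :: rest =>
      if bestlen ≤ cl ∨ target < s2 ∨ s2 <<< (bestlen - 1 - cl).toNat < target then
        dacB f target rest best bestlen
      else if s2 = target then
        dacB f target rest c cl
      else
        dacB f target ((s0, s2, s0 + s2, c * 2 + 1, cl + 1) :: (s1, s2, s1 + s2, c * 2, cl + 1) :: rest) best bestlen

def dac_search_alt (target : Int) (r0 : Int) (r1 : Int) (r2 : Int) (chain : Int) (chainlen : Int) (best : Int) (bestlen : Int) : Int × Int :=
  dacB (3 ^ (bestlen - chainlen).toNat) target [(r0, r1, r2, chain, chainlen)] best bestlen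

-- ===== PRECONDITION & SPEC =====
def Spec_dac_search (target : Int) (r0 : Int) (r1 : Int) (r2 : Int) (chain : Int) (chainlen : Int) (best : Int) (bestlen : Int) (out : Int × Int) : Prop := out = dac_search_alt target r0 r1 r2 chain chainlen best bestlen
instance (target : Int) (r0 : Int) (r1 : Int) (r2 : Int) (chain : Int) (chainlen : Int) (best : Int) (bestlen : Int) (out : Int × Int) : Decidable (Spec_dac_search target r0 r1 r2 chain chainlen best bestlen out) := by unfold Spec_dac_search; infer_instance

-- ===== CLAIM (what is proved, stated in full; the proofs are below) =====
def Claim_equal_dac_search : Prop := ∀ (target : Int) (r0 : Int) (r1 : Int) (r2 : Int) (chain : Int) (chainlen : Int) (best : Int) (bestlen : Int), Dom_dac_search target r0 r1 r2 chain chainlen best bestlen → Spec_dac_search target r0 r1 r2 chain chainlen best bestlen (dac_search target r0 r1 r2 chain chainlen best bestlen)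

-- ===== LEMMAS AND PROOFS =====

-- weight of one stack frame / of a stack, an upper bound on loop iterations it still costs
def frameW (bestlen : Int) (fr : Int × Int × Int × Int × Int) : Nat := 3 ^ (bestlen - fr.2.2.2.2).toNat
def stackW (bestlen : Int) (stack : List (Int × Int × Int × Int × Int)) : Nat := (stack.map (frameW bestlen)).sum

lemma frameW_mono {b b' : Int} (h : b' ≤ b) (fr : Int × Int × Int × Int × Int) : frameW b' fr ≤ frameW b fr := by
  unfold frameW
  exact Nat.pow_le_pow_right (by norm_num) (by omega)

lemma stackW_mono {b b' : Int} (h : b' ≤ b) (s : List (Int × Int × Int × Int × Int)) : stackW b' s ≤ stackW b s := by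
  unfold stackW
  induction s with
  | nil => simp
  | cons fr t ih => simpa [List.map_cons] using Nat.add_le_add (frameW_mono h fr) ih

lemma dacA_snd_le (f : Nat) (target r0 r1 r2 chain chainlen best bestlen : Int) :
    (dacA f target r0 r1 r2 chain chainlen best bestlen).2 ≤ bestlen := by
  induction f generalizing r0 r1 r2 chain chainlen best bestlen with
  | zero => simp [dacA]
  | succ f ih =>
    simp only [dacA]
    split_ifs with h1 h2 h3 h4
    · simp
    · simp
    · simp
    · simp; omega
    · exact le_trans (ih ..) (ih ..)

lemma dacA_fuel (f g : Nat) (target r0 r1 r2 chain chainlen best bestlen : Int)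
    (hf : (bestlen - chainlen).toNat ≤ f) (hg : (bestlen - chainlen).toNat ≤ g) :
    dacA f target r0 r1 r2 chain chainlen best bestlen = dacA g target r0 r1 r2 chain chainlen best bestlen := by
  induction f generalizing g r0 r1 r2 chain chainlen best bestlen with
  | zero =>
    have hbl : bestlen ≤ chainlen := by omega
    cases g with
    | zero => rfl
    | succ g => simp [dacA, hbl]
  | succ f ih =>
    cases g with
    | zero =>
      have hbl : bestlen ≤ chainlen := by omega
      simp [dacA, hbl]
    | succ g =>
      simp only [dacA]
      split_ifs with h1 h2 h3 h4
      · rfl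
      · rfl
      · rfl
      · rfl
      · have hk : (bestlen - (chainlen + 1)).toNat ≤ f := by omega
        have hk' : (bestlen - (chainlen + 1)).toNat ≤ g := by omega
        have e1 := ih g r0 r2 (r0 + r2) (chain * 2 + 1) (chainlen + 1) best bestlen hk hk'
        rw [e1]
        set p := dacA g target r0 r2 (r0 + r2) (chain * 2 + 1) (chainlen + 1) best bestlen with hp
        have hple : p.2 ≤ bestlen := by rw [hp]; exact dacA_snd_le ..
        exact ih g r1 r2 (r1 + r2) (chain * 2) (chainlen + 1) p.1 p.2 (by omega) (by omega)

-- one step of the fold B is equivalent to: run A's search on the popped frame with its exact fuel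
def foldStep (target : Int) (p : Int × Int) (fr : Int × Int × Int × Int × Int) : Int × Int :=
  dacA (p.2 - fr.2.2.2.2).toNat target fr.1 fr.2.1 fr.2.2.1 fr.2.2.2.1 fr.2.2.2.2 p.1 p.2

lemma dacB_eq_fold (n : Nat) : ∀ (target : Int) (stack : List (Int × Int × Int × Int × Int)) (best bestlen : Int) (f : Nat),
    stackW bestlen stack ≤ n → stackW bestlen stack ≤ f →
    dacB f target stack best bestlen = stack.foldl (foldStep target) (best, bestlen) := by
  induction n with
  | zero =>
    intro target stack best bestlen f hn hf
    cases stack with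
    | nil => cases f <;> simp [dacB]
    | cons fr rest =>
      exfalso
      have : 1 ≤ frameW bestlen fr := Nat.one_le_pow _ _ (by norm_num)
      simp [stackW, List.map_cons] at hn
      omega
  | succ n ih =>
    intro target stack best bestlen f hn hf
    cases stack with
    | nil => cases f <;> simp [dacB]
    | cons fr rest =>
      obtain ⟨s0, s1, s2, c, cl⟩ := fr
      have hw1 : 1 ≤ frameW bestlen (s0, s1, s2, c, cl) := Nat.one_le_pow _ _ (by norm_num)
      have hws : stackW bestlen ((s0, s1, s2, c, cl) :: rest) = frameW bestlen (s0, s1, s2, c, cl) + stackW bestlen rest := by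
        simp [stackW, List.map_cons]
      cases f with
      | zero => exfalso; omega
      | succ f =>
        simp only [dacB]
        by_cases hpr : bestlen ≤ cl ∨ target < s2 ∨ s2 <<< (bestlen - 1 - cl).toNat < target
        · rw [if_pos hpr]
          have hstep : foldStep target (best, bestlen) (s0, s1, s2, c, cl) = (best, bestlen) := by
            unfold foldStep
            rcases hpr with h | h | h
            · have : (bestlen - cl).toNat = 0 := by omega
              simp [this, dacA]
            · have h1 : ¬ bestlen ≤ cl ∨ bestlen ≤ cl := by omega
              rcases h1 with h1 | h1
              · have : (bestlen - cl).toNat = (bestlen - cl).toNat - 1 + 1 := by omega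
                rw [this]; simp [dacA, h]
              · have : (bestlen - cl).toNat = 0 := by omega
                simp [this, dacA]
            · have h1 : ¬ bestlen ≤ cl ∨ bestlen ≤ cl := by omega
              rcases h1 with h1 | h1
              · have : (bestlen - cl).toNat = (bestlen - cl).toNat - 1 + 1 := by omega
                rw [this]
                simp only [dacA]
                rw [if_neg h1]
                simp [h]
              · have : (bestlen - cl).toNat = 0 := by omega
                simp [this, dacA]
          rw [List.foldl_cons, hstep]
          exact ih target rest best bestlen f (by omega) (by omega)
        · rw [if_neg hpr]
          push_neg at hpr
          obtain ⟨h1, h2, h3⟩ := hpr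
          have hk1 : 1 ≤ (bestlen - cl).toNat := by omega
          have hunf : (bestlen - cl).toNat = (bestlen - cl).toNat - 1 + 1 := by omega
          by_cases heq : s2 = target
          · rw [if_pos heq]
            have hstep : foldStep target (best, bestlen) (s0, s1, s2, c, cl) = (c, cl) := by
              unfold foldStep
              rw [hunf]
              simp only [dacA]
              rw [if_neg (by omega), if_neg (by omega), if_neg (by omega), if_pos heq]
            rw [List.foldl_cons, hstep]
            refine ih target rest c cl f ?_ ?_
            · calc stackW cl rest ≤ stackW bestlen rest := stackW_mono (by omega) rest
                _ ≤ n := by omega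
            · calc stackW cl rest ≤ stackW bestlen rest := stackW_mono (by omega) rest
                _ ≤ f := by omega
          · rw [if_neg heq]
            -- expansion: frame of weight 3^k replaced by two frames of weight 3^(k-1)
            have hkc : (bestlen - (cl + 1)).toNat = (bestlen - cl).toNat - 1 := by omega
            have hwc : stackW bestlen ((s0, s2, s0 + s2, c * 2 + 1, cl + 1) :: (s1, s2, s1 + s2, c * 2, cl + 1) :: rest)
                = 3 ^ ((bestlen - cl).toNat - 1) + 3 ^ ((bestlen - cl).toNat - 1) + stackW bestlen rest := by
              simp [stackW, List.map_cons, frameW, hkc]; ring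
            have hwlt : 3 ^ ((bestlen - cl).toNat - 1) + 3 ^ ((bestlen - cl).toNat - 1) + 1 ≤ 3 ^ (bestlen - cl).toNat := by
              calc 3 ^ ((bestlen - cl).toNat - 1) + 3 ^ ((bestlen - cl).toNat - 1) + 1
                  ≤ 3 ^ ((bestlen - cl).toNat - 1) + 3 ^ ((bestlen - cl).toNat - 1) + 3 ^ ((bestlen - cl).toNat - 1) :=
                    Nat.add_le_add_left (Nat.one_le_pow _ _ (by norm_num)) _
                _ = 3 ^ ((bestlen - cl).toNat - 1) * 3 := by ring
                _ = 3 ^ ((bestlen - cl).toNat - 1 + 1) := by rw [pow_succ]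
                _ = 3 ^ (bestlen - cl).toNat := by rw [← hunf]
            have hfw : frameW bestlen (s0, s1, s2, c, cl) = 3 ^ (bestlen - cl).toNat := rfl
            have hIH := ih target ((s0, s2, s0 + s2, c * 2 + 1, cl + 1) :: (s1, s2, s1 + s2, c * 2, cl + 1) :: rest)
              best bestlen f (by rw [hwc]; omega) (by rw [hwc]; omega)
            rw [hIH]
            -- now both sides are folds; show the first step of the RHS fold equals two fold steps
            rw [List.foldl_cons, List.foldl_cons, List.foldl_cons]
            congr 1
            -- dacA on the popped frame = the two child fold-steps composed
            unfold foldStep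
            rw [hunf]
            simp only [dacA]
            rw [if_neg (by omega), if_neg (by omega), if_neg (by omega), if_neg heq]
            set p := dacA ((bestlen - cl).toNat - 1) target s0 s2 (s0 + s2) (c * 2 + 1) (cl + 1) best bestlen with hp
            have hchild : dacA ((bestlen - (cl + 1)).toNat) target s0 s2 (s0 + s2) (c * 2 + 1) (cl + 1) best bestlen = p := by
              rw [hkc, hp]
            have hple : p.2 ≤ bestlen := by rw [hp]; exact dacA_snd_le ..
            rw [hchild]
            exact dacA_fuel ((p.2 - (cl + 1)).toNat) ((bestlen - cl).toNat - 1) target s1 s2 (s1 + s2) (c * 2) (cl + 1) p.1 p.2 (by omega) (by omega)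

-- ===== VERDICT (by name: the statement is the Claim_ definition above) =====
theorem dac_search_spec : Claim_equal_dac_search := by
  intro target r0 r1 r2 chain chainlen best bestlen _
  unfold Spec_dac_search dac_search dac_search_alt
  have h := dacB_eq_fold (3 ^ (bestlen - chainlen).toNat) target [(r0, r1, r2, chain, chainlen)] best bestlen
    (3 ^ (bestlen - chainlen).toNat)
    (by simp [stackW, frameW]) (by simp [stackW, frameW])
  rw [h]
  simp [foldStep]
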